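-- pv_equiv track=rewrite | github.com/tintinrevient/methods-of-ai-research | part-1b/deliverables/keyword_matching_baseline.py | __keywordMatching
-- ===== SOURCE A (Python) =====
-- def __keywordMatching(utterance, repetition = False):
--
--     dialog_acts = {}
--     # Dialog acts keywords arrays
--     ack_keywords = ["okay", "kay", "well", "great", "fine", "good", "thatll", "do"]
--     affirm_keywords = ["yea", "yes", "correct", "right", "ye", "perfect", "yeah"]
--     bye_keywords = ["goodbye", "bye"]
--     confirm_keywords = ["is", "are", "they", "does", "do"] # always a question about the service (does it, do they, is it, are they). We omit 'it' for reasons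
--     deny_keywords = ["dont", "wrong", "no", "not", "change"]
--     hello_keywords = ["hello", "hi", "halo"]
--     negate_keywords = ["no"]
--     null_keywords = [] # default to anything else
--     repeat_keywords = ["repeat", "back", "again"]
--     reqalts_keywords = ["another", "about", "else"] #nonexistent in training data
--     reqmore_keywords = ["more"]
--     restart_keywords = ["start", "over", "reset", "restart"]
--     thankyou_keywords = ["thanks", "thank"]
--     # May be a question requesting (can i, may i, what is...)
--     request_keywords = []
--     request_details_keywords = ["much", "phone", "number", "postcode", "post", "code", "address", "type", "kind", "price", "range", "area", "telephone"]
--     request_question_keywords = ["how", "whats", "what", "can", "may", "could", "need"]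
--     request_keywords.extend(request_details_keywords)
--     request_keywords.extend(request_question_keywords)
--     #We will need a special set of words for this set
--     inform_food_type_keywords = ["thai", "chinese", "gastropub", "cuban", "seafood", "canapes", "indian", "african", "catalan", "turkish", "venetian", "porguguese", "oriental", "hungarian", "mediterranean", "creative", "asian", "traditional", "unusual", "malaysian", "jamaican", "french", "italian", "european", "american", "persian", "moroccan", "british", "korean", "romanian", "polish", "japanese", "english", "christmas", "barbecue", "cantonese", "spanish", "lebanese", "swedish", "mexican", "caribbean", "danish", "irish", "corsica", "afghan", "australian", "russian", "polynesian", "world", "kosher", "vegetarian", "tuscan", "scandinavian", "basque", "german", "persian", "eritrean", "austrian", "singaporean", "swiss", "scottish", "bistro", "welsh", "brazilian", "fusion", "steak", "pub", "halal", "gastro", "belgian", "steakhouse"]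
--     inform_price_range_keywords = ["cheap", "moderately", "moderate", "priced", "expensive"]
--     inform_area_keywords = ["south", "north", "east", "west", "center", "anywhere"]
--
--     inform_keywords = ["any", "kind", "food", "restaurant", "town", "part", "looking", "for", "dont", "care", "doesnt", "matter"]
--     inform_keywords.extend(inform_food_type_keywords)
--     inform_keywords.extend(inform_price_range_keywords)
--     inform_keywords.extend(inform_area_keywords)
--
--
--
--
--
--     dialog_acts["ack_keywords"] = ack_keywords
--     dialog_acts["affirm_keywords"] = affirm_keywords
--     dialog_acts["bye_keywords"] = bye_keywords
--     dialog_acts["confirm_keywords"] = confirm_keywords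
--     dialog_acts["deny_keywords"] = deny_keywords
--     dialog_acts["hello_keywords"] = hello_keywords
--     dialog_acts["inform_keywords"] = inform_keywords
--     dialog_acts["negate_keywords"] = negate_keywords
--     dialog_acts["null_keywords"] = null_keywords
--     dialog_acts["repeat_keywords"] = repeat_keywords
--     dialog_acts["reqalts_keywords"] = reqalts_keywords
--     dialog_acts["reqmore_keywords"] = reqmore_keywords
--     dialog_acts["request_keywords"] = request_keywords
--     dialog_acts["restart_keywords"] = restart_keywords
--     dialog_acts["thankyou_keywords"] = thankyou_keywords
--
--     utterance_keywords = utterance.split(" ")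
--
--     utterance_matches = {} #not really used but could be handy
--     utterance_matches_len = {}
--
--     if repetition == False:
--         for dialog_act in dialog_acts:
--             matches = set(dialog_acts[dialog_act]).intersection(utterance_keywords)
--             utterance_matches[dialog_act] = matches
--             utterance_matches_len[dialog_act] = len(matches)
--     else:
--         for dialog_act in dialog_acts:
--             matches = 0
--             for keyword in dialog_acts[dialog_act]:
--                 matches = matches + utterance_keywords.count(keyword)
--             utterance_matches[dialog_act] = set(dialog_acts[dialog_act]).intersection(utterance_keywords)
--             utterance_matches_len[dialog_act] = matches
--     max_matches = max(utterance_matches_len.values())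
--     dialog_matches = [ k for k, v in utterance_matches_len.items() if v == max_matches]
--
--     return dialog_matches
-- ===== SOURCE B (Python) =====
-- def __keywordMatching(utterance, repetition = False):
--     # Inverted index: instead of scoring each act against the token list, we map each
--     # keyword to the act names containing it (with multiplicity), walk the tokens once,
--     # and bump a score counter per hit.
--     acts = [
--         ("ack_keywords", ["okay", "kay", "well", "great", "fine", "good", "thatll", "do"]),
--         ("affirm_keywords", ["yea", "yes", "correct", "right", "ye", "perfect", "yeah"]),
--         ("bye_keywords", ["goodbye", "bye"]),
--         ("confirm_keywords", ["is", "are", "they", "does", "do"]),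
--         ("deny_keywords", ["dont", "wrong", "no", "not", "change"]),
--         ("hello_keywords", ["hello", "hi", "halo"]),
--         ("inform_keywords", ["any", "kind", "food", "restaurant", "town", "part", "looking", "for", "dont", "care", "doesnt", "matter"]
--             + ["thai", "chinese", "gastropub", "cuban", "seafood", "canapes", "indian", "african", "catalan", "turkish", "venetian", "porguguese", "oriental", "hungarian", "mediterranean", "creative", "asian", "traditional", "unusual", "malaysian", "jamaican", "french", "italian", "european", "american", "persian", "moroccan", "british", "korean", "romanian", "polish", "japanese", "english", "christmas", "barbecue", "cantonese", "spanish", "lebanese", "swedish", "mexican", "caribbean", "danish", "irish", "corsica", "afghan", "australian", "russian", "polynesian", "world", "kosher", "vegetarian", "tuscan", "scandinavian", "basque", "german", "persian", "eritrean", "austrian", "singaporean", "swiss", "scottish", "bistro", "welsh", "brazilian", "fusion", "steak", "pub", "halal", "gastro", "belgian", "steakhouse"]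
--             + ["cheap", "moderately", "moderate", "priced", "expensive"]
--             + ["south", "north", "east", "west", "center", "anywhere"]),
--         ("negate_keywords", ["no"]),
--         ("null_keywords", []),
--         ("repeat_keywords", ["repeat", "back", "again"]),
--         ("reqalts_keywords", ["another", "about", "else"]),
--         ("reqmore_keywords", ["more"]),
--         ("request_keywords", ["much", "phone", "number", "postcode", "post", "code", "address", "type", "kind", "price", "range", "area", "telephone"]
--             + ["how", "whats", "what", "can", "may", "could", "need"]),
--         ("restart_keywords", ["start", "over", "reset", "restart"]),
--         ("thankyou_keywords", ["thanks", "thank"]),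
--     ]
--     # keyword -> act names containing it, multiplicity preserved
--     pairs = [(kw, name) for name, kws in acts for kw in kws]
--     index = {}
--     for kw, name in pairs:
--         index[kw] = index.get(kw, []) + [name]
--     scores = {name: 0 for name, _ in acts}
--     tokens = utterance.split(" ")
--     if repetition:
--         # every token occurrence scores every act occurrence of that keyword
--         hits = [name for t in tokens for name in index.get(t, [])]
--     else:
--         # each distinct token scores each act at most once per distinct keyword
--         hits = [name for t in dict.fromkeys(tokens) for name in dict.fromkeys(index.get(t, []))]
--     for name in hits:
--         scores[name] += 1
--     best = max(scores.values())
--     return [name for name, s in scores.items() if s == best]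
-- ===== Notes on version B (the rewrite author's own statement) =====
-- stated objective: alternative
-- what changed: Inverts the traversal: instead of scoring every dialog act by scanning the token list per keyword (set intersection / list.count), B builds an inverted index keyword->act names, walks the utterance tokens, and bumps a per-act score counter on each hit; the tie list then falls out of the score dict in insertion order.
import Mathlib
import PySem

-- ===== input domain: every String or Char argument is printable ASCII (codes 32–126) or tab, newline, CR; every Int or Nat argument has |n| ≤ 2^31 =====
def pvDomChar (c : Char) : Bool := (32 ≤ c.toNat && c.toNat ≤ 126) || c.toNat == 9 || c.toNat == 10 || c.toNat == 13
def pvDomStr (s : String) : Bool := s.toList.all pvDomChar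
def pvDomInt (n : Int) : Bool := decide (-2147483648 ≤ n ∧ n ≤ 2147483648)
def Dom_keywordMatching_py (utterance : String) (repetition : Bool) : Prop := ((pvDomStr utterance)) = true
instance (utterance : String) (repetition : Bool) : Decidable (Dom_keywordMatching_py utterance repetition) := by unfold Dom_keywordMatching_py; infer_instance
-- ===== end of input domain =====

-- B inverts A's traversal: instead of scoring every act against the token list, it builds an
-- inverted index keyword → act names once, walks the tokens, and bumps a score counter per hit.

-- ===== PORT A =====
-- A-side helpers: the literal keyword lists of __keywordMatching
def kwAck : List String := ["okay", "kay", "well", "great", "fine", "good", "thatll", "do"]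
def kwAffirm : List String := ["yea", "yes", "correct", "right", "ye", "perfect", "yeah"]
def kwBye : List String := ["goodbye", "bye"]
def kwConfirm : List String := ["is", "are", "they", "does", "do"]
def kwDeny : List String := ["dont", "wrong", "no", "not", "change"]
def kwHello : List String := ["hello", "hi", "halo"]
def kwNegate : List String := ["no"]
def kwNull : List String := []
def kwRepeat : List String := ["repeat", "back", "again"]
def kwReqalts : List String := ["another", "about", "else"]
def kwReqmore : List String := ["more"]
def kwRestart : List String := ["start", "over", "reset", "restart"]
def kwThankyou : List String := ["thanks", "thank"]
def kwRequestDetails : List String := ["much", "phone", "number", "postcode", "post", "code", "address", "type", "kind", "price", "range", "area", "telephone"]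
def kwRequestQuestion : List String := ["how", "whats", "what", "can", "may", "could", "need"]
-- request_keywords = [] then .extend twice
def kwRequest : List String := kwRequestDetails ++ kwRequestQuestion
def kwInformFood : List String := ["thai", "chinese", "gastropub", "cuban", "seafood", "canapes", "indian", "african", "catalan", "turkish", "venetian", "porguguese", "oriental", "hungarian", "mediterranean", "creative", "asian", "traditional", "unusual", "malaysian", "jamaican", "french", "italian", "european", "american", "persian", "moroccan", "british", "korean", "romanian", "polish", "japanese", "english", "christmas", "barbecue", "cantonese", "spanish", "lebanese", "swedish", "mexican", "caribbean", "danish", "irish", "corsica", "afghan", "australian", "russian", "polynesian", "world", "kosher", "vegetarian", "tuscan", "scandinavian", "basque", "german", "persian", "eritrean", "austrian", "singaporean", "swiss", "scottish", "bistro", "welsh", "brazilian", "fusion", "steak", "pub", "halal", "gastro", "belgian", "steakhouse"]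
def kwInformPrice : List String := ["cheap", "moderately", "moderate", "priced", "expensive"]
def kwInformArea : List String := ["south", "north", "east", "west", "center", "anywhere"]
-- inform_keywords = [...] then .extend three times
def kwInform : List String := ["any", "kind", "food", "restaurant", "town", "part", "looking", "for", "dont", "care", "doesnt", "matter"] ++ kwInformFood ++ kwInformPrice ++ kwInformArea

-- dialog_acts, built key by key in A's insertion order
def dialogActsA : PySem.Dict String (List String) :=
  ((((((((((((((PySem.Dict.empty.insert "ack_keywords" kwAck).insert
    "affirm_keywords" kwAffirm).insert
    "bye_keywords" kwBye).insert
    "confirm_keywords" kwConfirm).insert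
    "deny_keywords" kwDeny).insert
    "hello_keywords" kwHello).insert
    "inform_keywords" kwInform).insert
    "negate_keywords" kwNegate).insert
    "null_keywords" kwNull).insert
    "repeat_keywords" kwRepeat).insert
    "reqalts_keywords" kwReqalts).insert
    "reqmore_keywords" kwReqmore).insert
    "request_keywords" kwRequest).insert
    "restart_keywords" kwRestart).insert
    "thankyou_keywords" kwThankyou

def keywordMatching_py (utterance : String) (repetition : Bool) : List String :=
  let dialog_acts := dialogActsA
  -- utterance.split(" "): sep is non-empty so split? never returns none
  let utterance_keywords := (PySem.Str.split? utterance " ").getD []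
  -- the loop builds (utterance_matches, utterance_matches_len); utterance_matches is dead but kept
  let st :=
    if repetition = false then
      dialog_acts.keys.foldl
        (fun (st : PySem.Dict String (PySem.Set String) × PySem.Dict String Int) k =>
          (st.1.insert k (PySem.Set.inter (PySem.Set.ofList (dialog_acts.getD k [])) utterance_keywords),
           st.2.insert k (PySem.Set.len (PySem.Set.inter (PySem.Set.ofList (dialog_acts.getD k [])) utterance_keywords))))
        (PySem.Dict.empty, PySem.Dict.empty)
    else
      dialog_acts.keys.foldl
        (fun (st : PySem.Dict String (PySem.Set String) × PySem.Dict String Int) k =>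
          (st.1.insert k (PySem.Set.inter (PySem.Set.ofList (dialog_acts.getD k [])) utterance_keywords),
           st.2.insert k ((dialog_acts.getD k []).foldl
             (fun acc keyword => acc + (PySem.List.count utterance_keywords keyword : Int)) 0)))
        (PySem.Dict.empty, PySem.Dict.empty)
  let utterance_matches_len := st.2
  -- max(utterance_matches_len.values()): the dict always has 15 keys, so the none case is unreachable
  match PySem.List.max? utterance_matches_len.values (fun v => v) with
  | none => []
  | some max_matches =>
      (utterance_matches_len.items.filter (fun kv => kv.2 == max_matches)).map (fun kv => kv.1)

-- ===== PORT B =====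
-- B-side helper: the same literal data as one ordered (act, keywords) table
def actsB : List (String × List String) :=
  [("ack_keywords", kwAck), ("affirm_keywords", kwAffirm), ("bye_keywords", kwBye),
   ("confirm_keywords", kwConfirm), ("deny_keywords", kwDeny), ("hello_keywords", kwHello),
   ("inform_keywords", kwInform), ("negate_keywords", kwNegate), ("null_keywords", kwNull),
   ("repeat_keywords", kwRepeat), ("reqalts_keywords", kwReqalts), ("reqmore_keywords", kwReqmore),
   ("request_keywords", kwRequest), ("restart_keywords", kwRestart), ("thankyou_keywords", kwThankyou)]

-- pairs = [(kw, name) for name, kws in acts for kw in kws]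
def pairsB : List (String × String) := actsB.flatMap (fun p => p.2.map (fun kw => (kw, p.1)))
-- index[kw] = index.get(kw, []) + [name]  (dict.modify is exactly that)
def indexB : PySem.Dict String (List String) :=
  pairsB.foldl (fun (d : PySem.Dict String (List String)) q => d.modify q.1 [] (· ++ [q.2])) PySem.Dict.empty
-- scores = {name: 0 for name, _ in acts}
def scores0B : PySem.Dict String Int := actsB.foldl (fun (d : PySem.Dict String Int) p => d.insert p.1 0) PySem.Dict.empty

def keywordMatching_py_alt (utterance : String) (repetition : Bool) : List String :=
  let tokens := (PySem.Str.split? utterance " ").getD []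
  let hits :=
    if repetition then tokens.flatMap (fun t => indexB.getD t [])
    else (PySem.List.dedup tokens).flatMap (fun t => PySem.List.dedup (indexB.getD t []))
  -- scores[name] += 1  (name is always a key of scores, so d[k] = d.get(k,0)+1 is exact)
  let scores := hits.foldl (fun (d : PySem.Dict String Int) n => d.insert n (d.getD n 0 + 1)) scores0B
  match PySem.List.max? scores.values (fun v => v) with
  | none => []
  | some best => (scores.items.filter (fun kv => kv.2 == best)).map (fun kv => kv.1)

-- ===== PRECONDITION & SPEC =====
def Spec_keywordMatching_py (utterance : String) (repetition : Bool) (out : List String) : Prop := out = keywordMatching_py_alt utterance repetition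
instance (utterance : String) (repetition : Bool) (out : List String) : Decidable (Spec_keywordMatching_py utterance repetition out) := by unfold Spec_keywordMatching_py; infer_instance

-- ===== CLAIM (what is proved, stated in full; the proofs are below) =====
def Claim_equal_keywordMatching_py : Prop := ∀ (utterance : String) (repetition : Bool), Dom_keywordMatching_py utterance repetition → Spec_keywordMatching_py utterance repetition (keywordMatching_py utterance repetition)

-- ===== LEMMAS AND PROOFS =====

-- the second component of A's pair-of-dicts loop ignores the first component
theorem snd_foldl_pair {α β γ : Type} (l : List γ) (f : α → γ → α) (g : β → γ → β) (a : α) (b : β) :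
    (l.foldl (fun st x => (f st.1 x, g st.2 x)) (a, b)).2 = l.foldl g b := by
  induction l generalizing a b with
  | nil => rfl
  | cons x t ih => simp [List.foldl, ih]

theorem keysA_nodup : (dialogActsA.keys.map (fun a => a)).Nodup := by decide

-- A's dict of acts, read back as the (key, value) table: it is B's table
theorem dialogActs_eq : dialogActsA.keys.map (fun k => (k, dialogActsA.getD k [])) = actsB := by
  decide

-- reading A's per-key loop over the dict as a map over B's table
theorem keys_map_val {γ : Type} (v : List String → γ) :
    dialogActsA.keys.map (fun a => (a, v (dialogActsA.getD a []))) = actsB.map (fun p => (p.1, v p.2)) := by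
  rw [← dialogActs_eq, List.map_map]
  rfl

-- ---- general counting lemmas ----
theorem count_flatMap' (l : List String) (g : String → List String) (a : String) :
    (l.flatMap g).count a = (l.map (fun x => (g x).count a)).sum := by
  induction l with
  | nil => rfl
  | cons x t ih => simp [List.flatMap_cons, List.count_append, ih]

theorem sum_count_cons (l2 t : List String) (x : String) :
    (l2.map (fun w => (x :: t).count w)).sum = l2.count x + (l2.map (fun w => t.count w)).sum := by
  induction l2 with
  | nil => simp
  | cons y s ih =>
    simp only [List.map_cons, List.sum_cons, ih]
    rw [List.count_cons, List.count_cons]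
    by_cases h : y = x
    · subst h; simp; omega
    · have h' : (y == x) = false := by simp [h]
      have h'' : (x == y) = false := by simp [Ne.symm h]
      rw [h', h'']; simp; omega

theorem sum_count_comm (l1 l2 : List String) :
    (l1.map (fun t => l2.count t)).sum = (l2.map (fun w => l1.count w)).sum := by
  induction l1 with
  | nil => simp
  | cons x t ih => rw [List.map_cons, List.sum_cons, ih, sum_count_cons]

theorem nodup_filter_len (l1 l2 : List String) (h1 : l1.Nodup) (h2 : l2.Nodup) :
    (l1.filter (fun x => decide (x ∈ l2))).length = (l2.filter (fun x => decide (x ∈ l1))).length := by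
  rw [← List.toFinset_card_of_nodup (h1.filter _), ← List.toFinset_card_of_nodup (h2.filter _)]
  congr 1
  rw [List.toFinset_filter, List.toFinset_filter]
  have e1 : l1.toFinset.filter (fun x => decide (x ∈ l2)) = l1.toFinset ∩ l2.toFinset := by
    ext z; simp [List.mem_toFinset]
  have e2 : l2.toFinset.filter (fun x => decide (x ∈ l1)) = l2.toFinset ∩ l1.toFinset := by
    ext z; simp [List.mem_toFinset]
  rw [e1, e2, Finset.inter_comm]

-- ---- the inverted index ----
theorem indexB_getD (t : String) :
    indexB.getD t [] = (pairsB.filter (fun q => q.1 == t)).map (fun q => q.2) := by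
  unfold indexB
  rw [PySem.Dict.getD_foldl_modify_append]
  rfl

-- multiplicity of an act name in the keyword pairs of a table with distinct act names
theorem tbl_countP (tbl : List (String × List String)) (hnd : (tbl.map Prod.fst).Nodup)
    (a : String) (kws : List String) (hmem : (a, kws) ∈ tbl) (t : String) :
    (tbl.flatMap (fun p => p.2.map (fun kw => (kw, p.1)))).countP
      (fun q => (q.2 == a) && (q.1 == t)) = kws.count t := by
  induction tbl with
  | nil => cases hmem
  | cons hd tl ih =>
    rw [List.flatMap_cons, List.countP_append, List.countP_map]
    have hhd : (hd.2.map (fun kw => (kw, hd.1))).countP (fun q => (q.2 == a) && (q.1 == t))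
        = if hd.1 = a then hd.2.count t else 0 := by
      rw [List.countP_map]
      by_cases h : hd.1 = a
      · simp only [h]
        simp [List.count_eq_countP]
        rw [List.countP_congr]
        intro x _; simp
      · rw [if_neg h]
        apply List.countP_eq_zero.mpr
        intro x _
        simp [Function.comp, h]
    rw [List.countP_map] at hhd
    rw [hhd]
    rcases List.mem_cons.mp hmem with heq | htl
    · have ha : hd.1 = a := by rw [← heq]
      have hk : hd.2 = kws := by rw [← heq]
      rw [if_pos ha, hk]
      have hnotin : a ∉ tl.map Prod.fst := by
        rw [List.map_cons] at hnd
        have := (List.nodup_cons.mp hnd).1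
        rwa [ha] at this
      have hz : (tl.flatMap (fun p => p.2.map (fun kw => (kw, p.1)))).countP
          (fun q => (q.2 == a) && (q.1 == t)) = 0 := by
        apply List.countP_eq_zero.mpr
        intro q hq
        rcases List.mem_flatMap.mp hq with ⟨p, hp, hq2⟩
        rcases List.mem_map.mp hq2 with ⟨kw, _, rfl⟩
        have : p.1 ∈ tl.map Prod.fst := List.mem_map.mpr ⟨p, hp, rfl⟩
        have hne : p.1 ≠ a := fun h => hnotin (h ▸ this)
        simp [hne]
      rw [hz]
      simp
    · have hain : a ∈ tl.map Prod.fst := List.mem_map.mpr ⟨(a, kws), htl, rfl⟩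
      have hne : hd.1 ≠ a := by
        rw [List.map_cons] at hnd
        intro h
        exact (List.nodup_cons.mp hnd).1 (h ▸ hain)
      rw [if_neg hne, ih (List.nodup_cons.mp (by rwa [List.map_cons] at hnd)).2 htl]
      simp

theorem actsB_names_nodup : (actsB.map Prod.fst).Nodup := by decide

-- number of copies of act p.1 among the keyword matches for token t = count of t in p's list
theorem countAct (p : String × List String) (hp : p ∈ actsB) (t : String) :
    (indexB.getD t []).count p.1 = p.2.count t := by
  rw [indexB_getD, List.count_eq_countP, List.countP_map, List.countP_filter]
  exact tbl_countP actsB actsB_names_nodup p.1 p.2 hp t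

-- membership in the index value = the token is one of p's keywords
theorem memAct (p : String × List String) (hp : p ∈ actsB) (t : String) :
    (p.1 ∈ indexB.getD t []) ↔ t ∈ p.2 := by
  rw [← List.count_pos_iff, ← List.count_pos_iff, countAct p hp]

-- every act name appearing in the index is a key of scores0B
theorem index_val_mem (t n : String) (h : n ∈ indexB.getD t []) : n ∈ actsB.map Prod.fst := by
  rw [indexB_getD] at h
  rcases List.mem_map.mp h with ⟨q, hq, rfl⟩
  rcases List.mem_flatMap.mp (List.mem_of_mem_filter hq) with ⟨p, hp, hq2⟩
  rcases List.mem_map.mp hq2 with ⟨kw, _, rfl⟩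
  exact List.mem_map.mpr ⟨p, hp, rfl⟩

-- Set.update by elements already present is the identity
theorem set_update_of_mem (l : List String) (s : PySem.Set String) (h : ∀ x ∈ l, x ∈ s) :
    PySem.Set.update s l = s := by
  induction l generalizing s with
  | nil => rfl
  | cons x t ih =>
    have hx : PySem.Set.add s x = s := by
      simp [PySem.Set.add, PySem.Set.contains, h x (List.mem_cons_self)]
    show PySem.Set.update (PySem.Set.add s x) t = s
    rw [hx]
    exact ih s (fun y hy => h y (List.mem_cons_of_mem _ hy))

theorem scores0B_items : scores0B.items = actsB.map (fun p => (p.1, (0 : Int))) := by decide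
theorem scores0B_keys_nodup : scores0B.keys.Nodup := by decide
theorem scores0B_keys : scores0B.keys = actsB.map Prod.fst := by decide

-- the bump loop over any hit list contained in the act names: final items, act by act
theorem scores_items (hits : List String) (hsub : ∀ n ∈ hits, n ∈ actsB.map Prod.fst) :
    (hits.foldl (fun (d : PySem.Dict String Int) n => d.insert n (d.getD n 0 + 1)) scores0B).items
      = actsB.map (fun p => (p.1, (hits.count p.1 : Int))) := by
  have hkeys : (hits.foldl (fun (d : PySem.Dict String Int) n => d.insert n (d.getD n 0 + 1)) scores0B).keys
      = scores0B.keys := by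
    rw [PySem.Dict.keys_foldl_insert]
    exact set_update_of_mem hits scores0B.keys (fun x hx => by
      rw [scores0B_keys]; exact hsub x hx)
  have hnd : (hits.foldl (fun (d : PySem.Dict String Int) n => d.insert n (d.getD n 0 + 1)) scores0B).keys.Nodup := by
    rw [hkeys]; exact scores0B_keys_nodup
  rw [PySem.Dict.items_eq_map_keys _ hnd 0, hkeys, scores0B_keys, List.map_map]
  apply List.map_congr_left
  intro p hp
  simp only [Function.comp]
  congr 1
  rw [PySem.Dict.getD_foldl_insert_add_one]
  have h0 : scores0B.getD p.1 0 = 0 := by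
    apply PySem.Dict.getD_of_mem_items
    · rw [scores0B_items]
      exact List.mem_map.mpr ⟨p, hp, rfl⟩
    · exact scores0B_keys_nodup
  rw [h0, zero_add]

-- repetition=True: hit count per act = A's summed token counts
theorem count_true (tokens : List String) (p : String × List String) (hp : p ∈ actsB) :
    ((tokens.flatMap (fun t => indexB.getD t [])).count p.1 : Int)
      = p.2.foldl (fun acc keyword => acc + (PySem.List.count tokens keyword : Int)) 0 := by
  rw [count_flatMap']
  have h1 : tokens.map (fun t => (indexB.getD t []).count p.1) = tokens.map (fun t => p.2.count t) := by
    apply List.map_congr_left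
    intro t _
    exact countAct p hp t
  rw [h1, sum_count_comm]
  rw [PySem.List.foldl_add]
  simp only [PySem.List.count_eq, zero_add]
  rw [Nat.cast_list_sum, List.map_map]
  rfl

-- repetition=False: hit count per act = A's |set(kws) ∩ tokens|
theorem count_false (tokens : List String) (p : String × List String) (hp : p ∈ actsB) :
    (((PySem.List.dedup tokens).flatMap (fun t => PySem.List.dedup (indexB.getD t []))).count p.1 : Int)
      = PySem.Set.len (PySem.Set.inter (PySem.Set.ofList p.2) tokens) := by
  rw [count_flatMap']
  have h1 : (PySem.List.dedup tokens).map (fun t => (PySem.List.dedup (indexB.getD t [])).count p.1)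
      = (PySem.List.dedup tokens).map (fun t => if decide (t ∈ p.2) = true then 1 else 0) := by
    apply List.map_congr_left
    intro t _
    by_cases h : p.1 ∈ indexB.getD t []
    · rw [List.count_eq_one_of_mem (PySem.List.nodup_dedup _) ((PySem.List.mem_dedup _ _).mpr h)]
      rw [if_pos (by simp [(memAct p hp t).mp h])]
    · rw [List.count_eq_zero_of_not_mem (fun hc => h ((PySem.List.mem_dedup _ _).mp hc))]
      rw [if_neg (by simp only [decide_eq_true_eq]; exact fun hc => h ((memAct p hp t).mpr hc))]
  rw [h1, PySem.List.sum_map_ite_one_zero_nat, List.countP_eq_length_filter]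
  have h2 : (PySem.List.dedup tokens).filter (fun t => decide (t ∈ p.2))
      = (PySem.List.dedup tokens).filter (fun t => decide (t ∈ PySem.List.dedup p.2)) := by
    apply List.filter_congr
    intro t _
    simp [PySem.List.mem_dedup]
  rw [h2, nodup_filter_len _ _ (PySem.List.nodup_dedup _) (PySem.List.nodup_dedup _)]
  have h3 : (PySem.List.dedup p.2).filter (fun x => decide (x ∈ PySem.List.dedup tokens))
      = (PySem.List.dedup p.2).filter (fun x => tokens.contains x) := by
    apply List.filter_congr
    intro x _
    simp
  rw [h3]
  simp only [PySem.Set.len, PySem.Set.inter, PySem.Set.contains, PySem.List.dedup_eq_ofList]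

-- ===== VERDICT (by name: the statement is the Claim_ definition above) =====
theorem keywordMatching_py_spec : Claim_equal_keywordMatching_py := by
  intro utterance repetition _
  unfold Spec_keywordMatching_py keywordMatching_py keywordMatching_py_alt
  cases repetition
  · -- repetition = false
    simp only [Bool.false_eq_true, reduceIte, if_false]
    have hsnd := snd_foldl_pair dialogActsA.keys
      (fun (a : PySem.Dict String (PySem.Set String)) k =>
        a.insert k ((PySem.Set.ofList (dialogActsA.getD k [])).inter ((PySem.Str.split? utterance " ").getD [])))
      (fun (d : PySem.Dict String Int) k =>
        d.insert k ((PySem.Set.ofList (dialogActsA.getD k [])).inter ((PySem.Str.split? utterance " ").getD [])).len)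
      PySem.Dict.empty PySem.Dict.empty
    simp only [] at hsnd
    rw [hsnd]
    have hitems := PySem.Dict.items_foldl_insert_fresh dialogActsA.keys (fun a => a)
      (fun k => ((PySem.Set.ofList (dialogActsA.getD k [])).inter ((PySem.Str.split? utterance " ").getD [])).len)
      PySem.Dict.empty (fun a _ => rfl) keysA_nodup
    simp only [] at hitems
    rw [PySem.Dict.values, hitems]
    have hkv := keys_map_val (fun kws => ((PySem.Set.ofList kws).inter ((PySem.Str.split? utterance " ").getD [])).len)
    simp only [] at hkv
    rw [hkv]
    have hB := scores_items
      (((PySem.List.dedup ((PySem.Str.split? utterance " ").getD [])).flatMap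
        (fun t => PySem.List.dedup (indexB.getD t []))))
      (fun n hn => by
        rcases List.mem_flatMap.mp hn with ⟨t, _, hn2⟩
        exact index_val_mem t n ((PySem.List.mem_dedup _ _).mp hn2))
    have hcnt : actsB.map (fun p => (p.1,
        ((((PySem.List.dedup ((PySem.Str.split? utterance " ").getD [])).flatMap
          (fun t => PySem.List.dedup (indexB.getD t []))).count p.1 : Int))))
        = actsB.map (fun p => (p.1,
          ((PySem.Set.ofList p.2).inter ((PySem.Str.split? utterance " ").getD [])).len)) := by
      apply List.map_congr_left
      intro p hp
      rw [count_false ((PySem.Str.split? utterance " ").getD []) p hp]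
    rw [hcnt] at hB
    rw [hB, PySem.Dict.values, hB]
    simp only [show (PySem.Dict.empty : PySem.Dict String Int).items = [] from rfl, List.nil_append]
  · -- repetition = true
    simp only [Bool.true_eq_false, reduceIte, if_false]
    have hsnd := snd_foldl_pair dialogActsA.keys
      (fun (a : PySem.Dict String (PySem.Set String)) k =>
        a.insert k ((PySem.Set.ofList (dialogActsA.getD k [])).inter ((PySem.Str.split? utterance " ").getD [])))
      (fun (d : PySem.Dict String Int) k =>
        d.insert k ((dialogActsA.getD k []).foldl
          (fun acc keyword => acc + (PySem.List.count ((PySem.Str.split? utterance " ").getD []) keyword : Int)) 0))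
      PySem.Dict.empty PySem.Dict.empty
    simp only [] at hsnd
    rw [hsnd]
    have hitems := PySem.Dict.items_foldl_insert_fresh dialogActsA.keys (fun a => a)
      (fun k => (dialogActsA.getD k []).foldl
        (fun acc keyword => acc + (PySem.List.count ((PySem.Str.split? utterance " ").getD []) keyword : Int)) 0)
      PySem.Dict.empty (fun a _ => rfl) keysA_nodup
    simp only [] at hitems
    rw [PySem.Dict.values, hitems]
    have hkv := keys_map_val (fun kws => kws.foldl
      (fun acc keyword => acc + (PySem.List.count ((PySem.Str.split? utterance " ").getD []) keyword : Int)) 0)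
    simp only [] at hkv
    rw [hkv]
    have hB := scores_items
      ((((PySem.Str.split? utterance " ").getD []).flatMap (fun t => indexB.getD t [])))
      (fun n hn => by
        rcases List.mem_flatMap.mp hn with ⟨t, _, hn2⟩
        exact index_val_mem t n hn2)
    have hcnt : actsB.map (fun p => (p.1,
        (((((PySem.Str.split? utterance " ").getD []).flatMap (fun t => indexB.getD t [])).count p.1 : Int))))
        = actsB.map (fun p => (p.1, p.2.foldl
          (fun acc keyword => acc + (PySem.List.count ((PySem.Str.split? utterance " ").getD []) keyword : Int)) 0)) := by
      apply List.map_congr_left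
      intro p hp
      rw [count_true ((PySem.Str.split? utterance " ").getD []) p hp]
    rw [hcnt] at hB
    rw [hB, PySem.Dict.values, hB]
    simp only [show (PySem.Dict.empty : PySem.Dict String Int).items = [] from rfl, List.nil_append]
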